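-- pv_equiv track=rewrite | github.com/schlmpcs/nuris_hackathon | src/nuris_pipeline/preprocess/tiling.py | _starts
-- ===== SOURCE A (Python) =====
-- def _starts(size: int, tile_size: int, stride: int) -> list[int]:
--     if size <= tile_size:
--         return [0]
--
--     starts: list[int] = []
--     current = 0
--     while True:
--         clamped = min(current, size - tile_size)
--         if not starts or starts[-1] != clamped:
--             starts.append(clamped)
--         if clamped >= size - tile_size:
--             break
--         current += stride
--     return starts
-- ===== SOURCE B (Python) =====
-- def _starts(size: int, tile_size: int, stride: int) -> list[int]:
--     if size <= tile_size:
--         return [0]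
--     last = size - tile_size
--     # build the offsets back-to-front: start from the final clamped offset,
--     # then step down through the largest stride-multiple below it to 0.
--     rev = [last]
--     x = (last - 1) // stride * stride
--     while x >= 0:
--         rev.append(x)
--         x -= stride
--     rev.reverse()
--     return rev
-- ===== Notes on version B (the rewrite author's own statement) =====
-- stated objective: alternative
-- what changed: Builds the offsets back-to-front: starts from the final clamped offset, steps downward through the largest stride-multiple below it to 0 by repeated subtraction, then reverses, instead of A's forward while-True loop with per-step min-clamping, dedup test and break.
import Mathlib
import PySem

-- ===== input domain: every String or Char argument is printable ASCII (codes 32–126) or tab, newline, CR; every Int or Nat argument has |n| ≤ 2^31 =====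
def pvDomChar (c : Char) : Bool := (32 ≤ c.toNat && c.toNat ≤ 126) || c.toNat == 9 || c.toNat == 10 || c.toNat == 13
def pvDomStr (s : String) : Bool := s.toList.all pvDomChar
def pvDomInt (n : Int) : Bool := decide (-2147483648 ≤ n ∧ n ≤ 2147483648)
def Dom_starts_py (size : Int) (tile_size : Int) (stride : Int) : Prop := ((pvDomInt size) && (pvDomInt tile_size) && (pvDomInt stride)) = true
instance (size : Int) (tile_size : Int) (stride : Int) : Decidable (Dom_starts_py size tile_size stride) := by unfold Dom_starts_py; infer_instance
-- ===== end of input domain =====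

-- B builds the offsets back-to-front (final clamped offset first, stepping down by stride
-- through stride-multiples to 0, then a reverse) instead of A's forward while-True loop
-- with per-step min-clamping, dedup test and break (objective: alternative).
-- Pre_ excludes size > tile_size with stride ≤ 0, where A loops forever.


-- ===== PORT A =====
-- the 'while True' loop of A; fuel is only a totality guard (it never runs out on Pre_)
def startsLoopA (size : Int) (tile_size : Int) (stride : Int) : Nat → Int → List Int → List Int
  | 0, _, acc => acc
  | fuel + 1, current, acc =>
    let clamped := min current (size - tile_size)
    let acc' := if acc = [] ∨ acc.getLast? ≠ some clamped then acc ++ [clamped] else acc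
    if clamped ≥ size - tile_size then acc'
    else startsLoopA size tile_size stride fuel (current + stride) acc'

def starts_py (size : Int) (tile_size : Int) (stride : Int) : List Int :=
  if size ≤ tile_size then [0]
  else startsLoopA size tile_size stride ((size - tile_size).toNat + 2) 0 []

-- ===== PORT B =====
-- the 'while x >= 0' loop of B; fuel is only a totality guard (it never runs out on Pre_)
def startsLoopB (stride : Int) : Nat → Int → List Int → List Int
  | 0, _, rev => rev
  | fuel + 1, x, rev =>
    if x ≥ 0 then startsLoopB stride fuel (x - stride) (rev ++ [x]) else rev

def starts_py_alt (size : Int) (tile_size : Int) (stride : Int) : List Int :=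
  if size ≤ tile_size then [0]
  else
    let last := size - tile_size
    let x0 := PySem.Int.floordiv (last - 1) stride * stride
    (startsLoopB stride (x0.toNat + 1) x0 [last]).reverse

-- ===== PRECONDITION & SPEC =====
-- Pre_ excludes size > tile_size with stride ≤ 0: there A never terminates (infinite while-True loop).
def Pre_starts_py (size : Int) (tile_size : Int) (stride : Int) : Prop :=
  size ≤ tile_size ∨ 0 < stride
instance (size : Int) (tile_size : Int) (stride : Int) : Decidable (Pre_starts_py size tile_size stride) := by unfold Pre_starts_py; infer_instance

def pvWitness_starts_py : Int × Int × Int := (10, 4, 3)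

def Spec_starts_py (size : Int) (tile_size : Int) (stride : Int) (out : List Int) : Prop := out = starts_py_alt size tile_size stride
instance (size : Int) (tile_size : Int) (stride : Int) (out : List Int) : Decidable (Spec_starts_py size tile_size stride out) := by unfold Spec_starts_py; infer_instance

-- ===== CLAIM (what is proved, stated in full; the proofs are below) =====
def Claim_equal_starts_py : Prop := ∀ (size : Int) (tile_size : Int) (stride : Int), Dom_starts_py size tile_size stride → Pre_starts_py size tile_size stride → Spec_starts_py size tile_size stride (starts_py size tile_size stride)

-- ===== LEMMAS AND PROOFS =====

theorem pyRange_pos_nil {a b s : Int} (hs : 0 < s) (h : b ≤ a) :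
    PySem.List.pyRange a b s = [] := by
  rw [PySem.List.pyRange_of_pos _ _ hs]
  simp [not_lt.2 h]

theorem pyRange_pos_cons {a b s : Int} (hs : 0 < s) (h : a < b) :
    PySem.List.pyRange a b s = a :: PySem.List.pyRange (a + s) b s := by
  rw [PySem.List.pyRange_of_pos _ _ hs, PySem.List.pyRange_of_pos _ _ hs]
  rw [if_pos h]
  by_cases h2 : a + s < b
  · rw [if_pos h2]
    have key : (b - a + s - 1) / s = (b - (a + s) + s - 1) / s + 1 := by
      have : b - a + s - 1 = (b - (a + s) + s - 1) + 1 * s := by ring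
      rw [this, Int.add_mul_ediv_right _ _ (ne_of_gt hs)]
    have hnn : 0 ≤ (b - (a + s) + s - 1) / s :=
      Int.ediv_nonneg (by omega) (le_of_lt hs)
    have hN : ((b - a + s - 1) / s).toNat = ((b - (a + s) + s - 1) / s).toNat + 1 := by
      omega
    rw [hN, List.range_succ_eq_map]
    simp only [List.map_cons, List.map_map]
    simp only [Nat.cast_zero, mul_zero, add_zero]
    refine congrArg₂ List.cons rfl (List.map_congr_left ?_)
    intro k _
    simp only [Function.comp_apply]
    push_cast
    ring
  · rw [if_neg h2]
    have h1 : 1 ≤ (b - a + s - 1) / s := by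
      rw [Int.le_ediv_iff_mul_le hs]; omega
    have hlt : (b - a + s - 1) / s < 2 := by
      rw [Int.ediv_lt_iff_lt_mul hs]; omega
    have : ((b - a + s - 1) / s).toNat = 1 := by omega
    rw [this]
    simp

-- pyRange with positive step as an explicit map over List.range
theorem pyRange_eq_map {s : Int} (hs : 0 < s) : ∀ (k : Nat) (a b : Int),
    (k : Int) * s < b - a → b - a ≤ ((k : Int) + 1) * s →
    PySem.List.pyRange a b s = (List.range (k + 1)).map (fun i : Nat => a + (i : Int) * s) := by
  intro k
  induction k with
  | zero =>
    intro a b h1 h2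
    rw [pyRange_pos_cons hs (by omega), pyRange_pos_nil hs (by omega)]
    simp [List.range_succ]
  | succ n ih =>
    intro a b h1 h2
    rw [pyRange_pos_cons hs (by push_cast at h1 ⊢; nlinarith)]
    rw [ih (a + s) b (by push_cast at h1 ⊢; linarith) (by push_cast at h2 ⊢; linarith)]
    have hr : List.range (n + 1 + 1) = 0 :: (List.range (n + 1)).map Nat.succ :=
      List.range_succ_eq_map
    rw [hr]
    simp only [List.map_cons, List.map_map]
    refine congrArg₂ List.cons (by push_cast; ring) (List.map_congr_left ?_)
    intro i _
    simp only [Function.comp_apply]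
    push_cast
    ring

-- characterisation of A's loop (from start state), result = pyRange ++ [last]
theorem startsLoopA_eq (size tile_size stride : Int) (hs : 0 < stride)
    (hl : 0 < size - tile_size) :
    ∀ (fuel : Nat) (current : Int) (acc : List Int),
      (size - tile_size - current).toNat < fuel →
      ((acc = [] ∧ current = 0) ∨
        (∃ p, acc.getLast? = some p ∧ p < current ∧ p < size - tile_size)) →
      startsLoopA size tile_size stride fuel current acc =
        acc ++ PySem.List.pyRange current (size - tile_size) stride ++ [size - tile_size] := by
  intro fuel
  induction fuel with
  | zero => intro current acc hf _; omega
  | succ n ih =>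
    intro current acc hf hinv
    by_cases hc : current < size - tile_size
    · have hmin : min current (size - tile_size) = current := min_eq_left (le_of_lt hc)
      have happ : acc = [] ∨ acc.getLast? ≠ some current := by
        rcases hinv with ⟨he, _⟩ | ⟨p, hp, hpc, _⟩
        · exact Or.inl he
        · exact Or.inr (by rw [hp]; exact fun h => absurd (Option.some.inj h) (by omega))
      simp only [startsLoopA, hmin]
      rw [if_pos happ, if_neg (by clear hinv happ; omega : ¬ current ≥ size - tile_size)]
      rw [ih (current + stride) (acc ++ [current]) (by clear hinv happ; omega)
        (Or.inr ⟨current, by simp, by clear hinv happ; omega, hc⟩)]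
      rw [pyRange_pos_cons hs hc]
      simp
    · have hmin : min current (size - tile_size) = size - tile_size := min_eq_right (by omega)
      obtain ⟨p, hp, _, hpl⟩ : ∃ p, acc.getLast? = some p ∧ p < current ∧ p < size - tile_size := by
        rcases hinv with ⟨_, hc0⟩ | h
        · omega
        · exact h
      have happ : acc = [] ∨ acc.getLast? ≠ some (size - tile_size) := by
        exact Or.inr (by rw [hp]; exact fun h => absurd (Option.some.inj h) (by omega))
      simp only [startsLoopA, hmin]
      rw [if_pos happ, if_pos (le_refl (size - tile_size))]
      rw [pyRange_pos_nil hs (by omega)]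
      simp

-- characterisation of B's loop: its reverse is the ascending multiples of stride, then rev reversed
theorem startsLoopB_eq {stride : Int} (hs : 0 < stride) :
    ∀ (k : Nat) (fuel : Nat) (rev : List Int), k < fuel →
      (startsLoopB stride fuel ((k : Int) * stride) rev).reverse =
        (List.range (k + 1)).map (fun i : Nat => (i : Int) * stride) ++ rev.reverse := by
  intro k
  induction k with
  | zero =>
    intro fuel rev hf
    obtain ⟨f, rfl⟩ : ∃ f, fuel = f + 1 := ⟨fuel - 1, by omega⟩
    simp only [startsLoopB, Nat.cast_zero, zero_mul]
    rw [if_pos (le_refl 0)]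
    cases f with
    | zero => simp [startsLoopB]
    | succ m =>
      simp only [startsLoopB, zero_sub]
      rw [if_neg (by omega)]
      simp
  | succ n ih =>
    intro fuel rev hf
    obtain ⟨f, rfl⟩ : ∃ f, fuel = f + 1 := ⟨fuel - 1, by omega⟩
    have hx : (0 : Int) ≤ (((n + 1 : Nat) : Int)) * stride := by positivity
    simp only [startsLoopB]
    rw [if_pos hx]
    have harg : (((n + 1 : Nat) : Int)) * stride - stride = (n : Int) * stride := by
      push_cast; ring
    rw [harg, ih f (rev ++ [(((n + 1 : Nat) : Int)) * stride]) (by omega)]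
    rw [List.range_succ, List.range_succ]
    simp only [List.map_append, List.map_cons, List.map_nil, List.reverse_append,
      List.reverse_cons, List.reverse_nil, List.nil_append, List.append_assoc,
      List.cons_append]
    push_cast
    rw [List.range_succ]
    simp only [List.map_append, List.map_cons, List.map_nil, List.append_assoc,
      List.cons_append, List.nil_append]

-- PySem.Int.floordiv agrees with Euclidean division for a positive divisor
theorem floordiv_pos_eq (a b : Int) (hb : 0 < b) : PySem.Int.floordiv a b = a / b := by
  simp [PySem.Int.floordiv, Int.fdiv_eq_ediv, le_of_lt hb]

-- ===== VERDICT (by name: the statement is the Claim_ definition above) =====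
theorem starts_py_spec : Claim_equal_starts_py := by
  intro size tile_size stride _ hpre
  unfold Spec_starts_py starts_py starts_py_alt
  by_cases hle : size ≤ tile_size
  · rw [if_pos hle, if_pos hle]
  · rw [if_neg hle, if_neg hle]
    have hs : 0 < stride := by
      rcases hpre with h | h
      · exact absurd h hle
      · exact h
    have hl : 0 < size - tile_size := by omega
    rw [startsLoopA_eq size tile_size stride hs hl _ 0 [] (by omega) (Or.inl ⟨rfl, rfl⟩)]
    simp only []
    set last := size - tile_size with hlast
    set q := PySem.Int.floordiv (last - 1) stride with hq
    have hqe : q = (last - 1) / stride := by rw [hq, floordiv_pos_eq _ _ hs]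
    have hq0 : 0 ≤ q := by rw [hqe]; exact Int.ediv_nonneg (by omega) (le_of_lt hs)
    have hlb : q * stride ≤ last - 1 := by
      rw [hqe]; exact Int.ediv_mul_le (last - 1) (ne_of_gt hs)
    have hub : last - 1 < (q + 1) * stride := by
      rw [hqe]; exact Int.lt_ediv_add_one_mul_self (last - 1) hs
    have hk : ((q.toNat : Int)) = q := Int.toNat_of_nonneg hq0
    have hfuel : q.toNat < (q * stride).toNat + 1 := by nlinarith [hk, hq0, hs, Int.toNat_of_nonneg (show (0:Int) ≤ q * stride by positivity)]
    have hB := startsLoopB_eq hs q.toNat ((q * stride).toNat + 1) [last] (by exact hfuel)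
    rw [hk] at hB
    rw [hB]
    rw [pyRange_eq_map hs q.toNat 0 last (by rw [hk]; omega) (by rw [hk]; omega)]
    simp
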